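-- pv_equiv track=rewrite | github.com/digwit678/OpenEvent-AI-FORK | scripts/validate_manual_ux_run.py | _hil_gate
-- ===== SOURCE A (Python) =====
-- from typing import Any, Dict, List, Optional
--
-- def _hil_gate(records: List[Dict[str, Any]]) -> bool:
--     seen_room_result = False
--     for rec in records:
--         if (rec.get('action') or '').lower() == 'room_avail_result':
--             seen_room_result = True
--         if (rec.get('action') or '').lower() == 'offer_draft_prepared':
--             msg_id = (rec.get('msg_id') or '').lower()
--             if 'hil' in msg_id and seen_room_result:
--                 return True
--     return False
-- ===== SOURCE B (Python) =====
-- def _hil_gate(records):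
--     pivot = next((i for i, rec in enumerate(records)
--                   if (rec.get('action') or '').lower() == 'room_avail_result'), None)
--     if pivot is None:
--         return False
--     return any((rec.get('action') or '').lower() == 'offer_draft_prepared'
--                and 'hil' in (rec.get('msg_id') or '').lower()
--                for rec in records[pivot:])
-- ===== Notes on version B (the rewrite author's own statement) =====
-- stated objective: alternative
-- what changed: Replaces the single flag-carrying pass with a two-phase locate-then-search: find the index of the first 'room_avail_result' record, return False if absent, else any() over the suffix for an 'offer_draft_prepared' record whose msg_id contains 'hil'.
import Mathlib
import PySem

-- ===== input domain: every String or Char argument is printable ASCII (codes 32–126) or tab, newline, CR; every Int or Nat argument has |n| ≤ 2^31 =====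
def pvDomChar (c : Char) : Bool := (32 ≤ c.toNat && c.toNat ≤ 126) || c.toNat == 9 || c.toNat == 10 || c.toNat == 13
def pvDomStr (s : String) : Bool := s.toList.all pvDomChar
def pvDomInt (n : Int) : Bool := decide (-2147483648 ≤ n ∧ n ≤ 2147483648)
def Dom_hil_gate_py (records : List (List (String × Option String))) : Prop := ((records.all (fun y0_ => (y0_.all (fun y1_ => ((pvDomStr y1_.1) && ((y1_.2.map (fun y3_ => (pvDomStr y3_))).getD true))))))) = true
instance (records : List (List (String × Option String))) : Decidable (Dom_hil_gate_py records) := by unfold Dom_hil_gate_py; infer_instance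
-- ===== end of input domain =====

-- ===== PORT A =====
-- B changes the decomposition: locate the first room_avail_result, then search the suffix (alternative, not faster).
-- shared helper: both sources write (rec.get(k) or '').lower()
def pvGetLower (rec : List (String × Option String)) (k : String) : String :=
  PySem.Str.lower (match (PySem.Dict.mk rec).get? k with
    | some (some s) => s
    | _ => "")

def pvHilGateGo : List (List (String × Option String)) → Bool → Bool
  | [], _ => false
  | rec :: rest, seen =>
    let seen' := if pvGetLower rec "action" == "room_avail_result" then true else seen
    if pvGetLower rec "action" == "offer_draft_prepared" then
      let msg_id := pvGetLower rec "msg_id"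
      if PySem.Str.isIn "hil" msg_id && seen' then true else pvHilGateGo rest seen'
    else pvHilGateGo rest seen'

def hil_gate_py (records : List (List (String × Option String))) : Bool :=
  pvHilGateGo records false

-- ===== PORT B =====
def pvHilPred (rec : List (String × Option String)) : Bool :=
  pvGetLower rec "action" == "offer_draft_prepared"
    && PySem.Str.isIn "hil" (pvGetLower rec "msg_id")

def hil_gate_py_alt (records : List (List (String × Option String))) : Bool :=
  match records.findIdx? (fun rec => pvGetLower rec "action" == "room_avail_result") with
  | none => false
  | some i => (records.drop i).any pvHilPred

-- ===== PRECONDITION & SPEC =====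
def Spec_hil_gate_py (records : List (List (String × Option String))) (out : Bool) : Prop := out = hil_gate_py_alt records
instance (records : List (List (String × Option String))) (out : Bool) : Decidable (Spec_hil_gate_py records out) := by unfold Spec_hil_gate_py; infer_instance

-- ===== CLAIM (what is proved, stated in full; the proofs are below) =====
def Claim_equal_hil_gate_py : Prop := ∀ (records : List (List (String × Option String))), Dom_hil_gate_py records → Spec_hil_gate_py records (hil_gate_py records)

-- ===== LEMMAS AND PROOFS =====
theorem pvHilGateGo_eq (records : List (List (String × Option String))) (seen : Bool) :
    pvHilGateGo records seen = if seen then records.any pvHilPred else hil_gate_py_alt records := by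
  induction records generalizing seen with
  | nil => cases seen <;> simp [pvHilGateGo, hil_gate_py_alt]
  | cons rec rest ih =>
    by_cases hr : pvGetLower rec "action" == "room_avail_result"
    · have hne : (pvGetLower rec "action" == "offer_draft_prepared") = false := by
        have := eq_of_beq hr
        simp [this]
      cases seen <;>
        simp [pvHilGateGo, hr, hne, ih, hil_gate_py_alt, List.findIdx?_cons, List.any_cons,
          pvHilPred]
    · cases seen with
      | true =>
        by_cases ho : pvGetLower rec "action" == "offer_draft_prepared" <;>
          by_cases hh : PySem.Str.isIn "hil" (pvGetLower rec "msg_id") <;>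
            simp [pvHilGateGo, hr, ho, hh, ih, List.any_cons, pvHilPred]
      | false =>
        have halt : hil_gate_py_alt (rec :: rest) = hil_gate_py_alt rest := by
          simp only [hil_gate_py_alt, List.findIdx?_cons, hr, Bool.false_eq_true, if_false]
          cases hfi : rest.findIdx? (fun r => pvGetLower r "action" == "room_avail_result") with
          | none => simp
          | some i => simp
        by_cases ho : pvGetLower rec "action" == "offer_draft_prepared" <;>
          simp [pvHilGateGo, hr, ho, ih, halt]

-- ===== VERDICT (by name: the statement is the Claim_ definition above) =====
theorem hil_gate_py_spec : Claim_equal_hil_gate_py := by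
  intro records _
  unfold Spec_hil_gate_py hil_gate_py
  rw [pvHilGateGo_eq]
  simp
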